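-- pv_equiv track=rewrite | github.com/Yannn25/Footinator | mychatbot/main.py | filter_players
-- ===== SOURCE A (Python) =====
-- def filter_players(players, filters):
--     """
--     Filter the list of players based on the given filters.
--     :param players: The list of players.
--     :param filters: A dictionary containing the filters.
--     :return: The filtered list of players.
--     """
--     filtered_players = []
--     for player in players:
--         match = True
--         for attribute, value in filters.items():
--             if value != '' and player.get(attribute) != value:
--                 match = False
--                 break
--         if match:
--             filtered_players.append(player)
--     return filtered_players
-- ===== SOURCE B (Python) =====
-- def filter_players(players, filters):
--     """Filter players matching all non-empty filter values.
--
--     Different decomposition: compute the active filters first, then narrow the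
--     result list by one repeated scan per active filter (filters-outer,
--     players-inner) instead of A's single players-pass with an inner break.
--     """
--     active = [(attribute, value) for attribute, value in filters.items() if value != '']
--     result = list(players)
--     for attribute, value in active:
--         result = [p for p in result if p.get(attribute) == value]
--     return result
-- ===== Notes on version B (the rewrite author's own statement) =====
-- stated objective: alternative
-- what changed: B precomputes the active (non-empty) filters and narrows the player list by successive per-filter scans, instead of A's single players pass with an inner early-break loop over all filters.
import Mathlib
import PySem

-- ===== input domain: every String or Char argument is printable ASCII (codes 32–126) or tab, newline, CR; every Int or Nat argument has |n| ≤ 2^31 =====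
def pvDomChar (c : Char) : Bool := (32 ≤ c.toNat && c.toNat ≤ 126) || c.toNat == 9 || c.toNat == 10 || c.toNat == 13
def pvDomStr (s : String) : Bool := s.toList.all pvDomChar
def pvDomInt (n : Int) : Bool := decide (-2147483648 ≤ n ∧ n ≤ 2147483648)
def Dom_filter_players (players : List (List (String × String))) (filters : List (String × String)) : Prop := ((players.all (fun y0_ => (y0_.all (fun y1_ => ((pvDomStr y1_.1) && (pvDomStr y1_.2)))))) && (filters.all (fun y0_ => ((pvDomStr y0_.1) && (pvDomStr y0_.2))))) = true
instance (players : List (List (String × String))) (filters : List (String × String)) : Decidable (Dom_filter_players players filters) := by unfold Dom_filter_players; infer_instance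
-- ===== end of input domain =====

-- B precomputes the active (non-empty) filters and narrows the player list by successive
-- per-filter scans, instead of A's single players pass with an inner early-break loop.

-- ===== PORT A =====
-- inner 'for attribute, value in filters.items(): … break' loop of A
def pvMatchA (player : List (String × String)) : List (String × String) → Bool
  | [] => true
  | (attr, value) :: rest =>
    if value ≠ "" ∧ (PySem.Dict.mk player).get? attr ≠ some value then false
    else pvMatchA player rest

def filter_players (players : List (List (String × String))) (filters : List (String × String)) : List (List (String × String)) :=
  players.foldl (fun filtered_players player =>
    if pvMatchA player filters then filtered_players ++ [player] else filtered_players) []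

-- ===== PORT B =====
def filter_players_alt (players : List (List (String × String))) (filters : List (String × String)) : List (List (String × String)) :=
  let active := filters.filter (fun av => av.2 ≠ "")
  active.foldl (fun result av =>
    result.filter (fun p => (PySem.Dict.mk p).get? av.1 == some av.2)) players

-- ===== PRECONDITION & SPEC =====
def Spec_filter_players (players : List (List (String × String))) (filters : List (String × String)) (out : List (List (String × String))) : Prop := out = filter_players_alt players filters
instance (players : List (List (String × String))) (filters : List (String × String)) (out : List (List (String × String))) : Decidable (Spec_filter_players players filters out) := by unfold Spec_filter_players; infer_instance

-- ===== CLAIM (what is proved, stated in full; the proofs are below) =====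
def Claim_equal_filter_players : Prop := ∀ (players : List (List (String × String))) (filters : List (String × String)), Dom_filter_players players filters → Spec_filter_players players filters (filter_players players filters)

-- ===== LEMMAS AND PROOFS =====

-- A's append-accumulator pass is List.filter by the inner-loop predicate
theorem filter_players_eq_filter (players : List (List (String × String))) (filters : List (String × String)) :
    filter_players players filters = players.filter (fun p => pvMatchA p filters) := by
  unfold filter_players
  rw [PySem.List.foldl_append_if]
  simp

-- B's successive narrowing computes the same filter
theorem alt_eq_filter (filters : List (String × String)) (players : List (List (String × String))) :
    filter_players_alt players filters = players.filter (fun p => pvMatchA p filters) := by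
  unfold filter_players_alt
  induction filters generalizing players with
  | nil => simp [pvMatchA]
  | cons av rest ih =>
    obtain ⟨a, v⟩ := av
    by_cases hv : v = ""
    · subst hv
      simpa [pvMatchA] using ih players
    · have hact : List.filter (fun av => decide (av.2 ≠ "")) ((a, v) :: rest)
          = (a, v) :: List.filter (fun av => decide (av.2 ≠ "")) rest := by simp [hv]
      simp only [hact, List.foldl_cons]
      rw [ih, List.filter_filter]
      congr 1
      funext p
      by_cases hp : (PySem.Dict.mk p).get? a = some v <;>
        simp [pvMatchA, hv, hp]

-- ===== VERDICT (by name: the statement is the Claim_ definition above) =====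
theorem filter_players_spec : Claim_equal_filter_players := by
  intro players filters _
  unfold Spec_filter_players
  rw [filter_players_eq_filter, alt_eq_filter]
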